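-- pv_equiv track=rewrite | github.com/Jak57/6.006 | ps0/count_long_subarray.py | count_long_subarray
-- ===== SOURCE A (Python) =====
-- def count_long_subarray(A):
--     '''
--     Input:  A     | Python Tuple of positive integers
--     Output: count | number of longest increasing subarrays of A
--     '''
--     count = 0
--     ##################
--     # YOUR CODE HERE #
--     ##################
--
--     max_len = 0
--     arr = []
--
--     for i in range(len(A)):
--         temp_count = 0
--         j = i
--         k = i + 1
--
--         while (j < len(A) and k < len(A)):
--
--             if A[j] < A[k]:
--                 temp_count += 1
--             else:
--                 break
--
--             j += 1
--             k += 1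
--
--         max_len = max(max_len, temp_count + 1)
--         arr.append(temp_count + 1)
--
--     for i in range(len(arr)):
--         if arr[i] == max_len:
--             count += 1
--
--     return count
-- ===== SOURCE B (Python) =====
-- def count_long_subarray(A):
--     '''
--     Input:  A     | Python Tuple of positive integers
--     Output: count | number of longest increasing subarrays of A
--     '''
--     run = 0
--     best = 0
--     count = 0
--     n = len(A)
--     for i in range(n - 1, -1, -1):
--         if i + 1 < n and A[i] < A[i + 1]:
--             run += 1
--         else:
--             run = 1
--         if run > best:
--             best = run
--             count = 1
--         elif run == best:
--             count += 1
--     return count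
-- ===== Notes on version B (the rewrite author's own statement) =====
-- stated objective: faster
-- what changed: Replaced A's quadratic scheme (an inner while-scan recomputing the increasing-run length from every start index, then a second counting pass) by one backward pass that derives each run length in O(1) from the next one and maintains the maximum and its multiplicity on the fly.
import Mathlib
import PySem

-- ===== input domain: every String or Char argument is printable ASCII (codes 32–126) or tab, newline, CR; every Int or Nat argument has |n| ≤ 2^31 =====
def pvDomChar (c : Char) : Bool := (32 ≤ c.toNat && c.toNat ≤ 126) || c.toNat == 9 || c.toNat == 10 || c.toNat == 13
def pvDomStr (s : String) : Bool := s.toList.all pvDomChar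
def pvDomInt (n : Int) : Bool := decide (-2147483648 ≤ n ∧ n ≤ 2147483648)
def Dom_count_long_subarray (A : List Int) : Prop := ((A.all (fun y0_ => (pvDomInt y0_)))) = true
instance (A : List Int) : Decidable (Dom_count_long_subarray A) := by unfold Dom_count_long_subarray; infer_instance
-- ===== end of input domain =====

-- B replaces A's O(n^2) restart-the-scan-at-every-index scheme by a single backward pass
-- that derives each increasing-run length from the next one and counts maxima on the fly (objective: faster).

-- ===== PORT A =====
-- inner while loop of A: returns temp_count (number of successful A[j] < A[k] steps)
def pvWhileA (A : List Int) (j k : Int) : Int :=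
  if h : j < (A.length : Int) ∧ k < (A.length : Int) then
    if PySem.List.pyGetD A j 0 < PySem.List.pyGetD A k 0 then pvWhileA A (j + 1) (k + 1) + 1
    else 0
  else 0
termination_by ((A.length : Int) - j).toNat
decreasing_by omega

def count_long_subarray (A : List Int) : Int :=
  -- first for loop: builds max_len and arr together
  let s := (PySem.List.pyRange 0 (A.length : Int) 1).foldl
    (fun (s : Int × List Int) i =>
      let temp_count := pvWhileA A i (i + 1)
      (max s.1 (temp_count + 1), s.2 ++ [temp_count + 1])) (0, [])
  let max_len := s.1
  let arr := s.2
  -- second for loop: count entries of arr equal to max_len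
  (PySem.List.pyRange 0 (arr.length : Int) 1).foldl
    (fun c i => if PySem.List.pyGetD arr i 0 = max_len then c + 1 else c) 0

-- ===== PORT B =====
-- backward pass of Source B: processing A[i] after A[i+1..]; state = (run, best, count)
def pvAltGo : List Int → Int × Int × Int
  | [] => (0, 0, 0)
  | x :: rest =>
    let s := pvAltGo rest
    let run : Int := match rest with
      | [] => 1
      | y :: _ => if x < y then s.1 + 1 else 1
    if run > s.2.1 then (run, run, 1)
    else if run = s.2.1 then (run, s.2.1, s.2.2 + 1)
    else (run, s.2.1, s.2.2)

def count_long_subarray_alt (A : List Int) : Int := (pvAltGo A).2.2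

-- ===== PRECONDITION & SPEC =====
def Spec_count_long_subarray (A : List Int) (out : Int) : Prop := out = count_long_subarray_alt A
instance (A : List Int) (out : Int) : Decidable (Spec_count_long_subarray A out) := by unfold Spec_count_long_subarray; infer_instance

-- ===== CLAIM (what is proved, stated in full; the proofs are below) =====
def Claim_equal_count_long_subarray : Prop := ∀ (A : List Int), Dom_count_long_subarray A → Spec_count_long_subarray A (count_long_subarray A)

-- ===== LEMMAS AND PROOFS =====

-- run length of the increasing run starting at index i, as A computes it
def pvRunLen (A : List Int) (i : Nat) : Int := pvWhileA A (i : Int) ((i : Int) + 1) + 1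

-- reference list of run lengths, structurally
def pvRuns : List Int → List Int
  | [] => []
  | x :: rest =>
    (match rest with
      | [] => (1 : Int)
      | y :: _ => if x < y then (pvRuns rest).headD 0 + 1 else 1) :: pvRuns rest

def pvMax (l : List Int) : Int := l.foldr max 0

lemma pvMax_cons (x : Int) (l : List Int) : pvMax (x :: l) = max x (pvMax l) := rfl

lemma pvMax_nonneg (l : List Int) : 0 <= pvMax l := by
  induction l with
  | nil => simp [pvMax]
  | cons x t ih => rw [pvMax_cons]; omega

lemma le_pvMax {l : List Int} {x : Int} (h : x ∈ l) : x ≤ pvMax l := by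
  induction l with
  | nil => cases h
  | cons a t ih =>
    rcases List.mem_cons.mp h with rfl | h
    · simp [pvMax_cons]
    · have := ih h; simp [pvMax_cons]; omega

lemma pvAltGo_spec (l : List Int) :
    pvAltGo l = ((pvRuns l).headD 0, pvMax (pvRuns l),
                 ((pvRuns l).count (pvMax (pvRuns l)) : Int)) := by
  induction l with
  | nil => simp [pvAltGo, pvRuns, pvMax]
  | cons x rest ih =>
    cases rest with
    | nil => simp [pvAltGo, pvRuns, pvMax]
    | cons y t =>
      have hA : pvAltGo (x :: y :: t) =
          (let s := pvAltGo (y :: t);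
           let run : Int := if x < y then s.1 + 1 else 1;
           if run > s.2.1 then (run, run, 1)
           else if run = s.2.1 then (run, s.2.1, s.2.2 + 1)
           else (run, s.2.1, s.2.2)) := rfl
      have hR : pvRuns (x :: y :: t) =
          (if x < y then (pvRuns (y :: t)).headD 0 + 1 else 1) :: pvRuns (y :: t) := rfl
      rw [hA, ih, hR]
      simp only []
      set run : Int := if x < y then (pvRuns (y :: t)).headD 0 + 1 else 1 with hrundef
      rw [pvMax_cons]
      by_cases h1 : run > pvMax (pvRuns (y :: t))
      · rw [if_pos h1]
        have hmax : max run (pvMax (pvRuns (y :: t))) = run := by omega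
        have hnot : run ∉ pvRuns (y :: t) := fun hm => absurd (le_pvMax hm) (by omega)
        rw [hmax]
        simp [List.count_eq_zero.mpr hnot]
      · rw [if_neg h1]
        by_cases h2 : run = pvMax (pvRuns (y :: t))
        · rw [if_pos h2]
          simp [h2]
        · rw [if_neg h2]
          have hmax : max run (pvMax (pvRuns (y :: t))) = pvMax (pvRuns (y :: t)) := by omega
          simp [hmax, h2]

-- unfolding A's while loop once, from start index i
lemma pvRunLen_rec (A : List Int) (i : Nat) (hi : i < A.length) :
    pvRunLen A i =
      if i + 1 < A.length ∧ A.getD i 0 < A.getD (i + 1) 0 then pvRunLen A (i + 1) + 1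
      else 1 := by
  have e : ((i : Int)) + 1 = ((i + 1 : Nat) : Int) := by push_cast; ring
  unfold pvRunLen
  rw [pvWhileA]
  by_cases h1 : i + 1 < A.length
  · have hcond : ((i : Int) < (A.length : Int) ∧ (i : Int) + 1 < (A.length : Int)) := by
      constructor <;> [exact_mod_cast hi; exact_mod_cast h1]
    rw [dif_pos hcond]
    have g1 : PySem.List.pyGetD A (i : Int) 0 = A.getD i 0 := PySem.List.pyGetD_natCast ..
    have g2 : PySem.List.pyGetD A ((i : Int) + 1) 0 = A.getD (i + 1) 0 := by
      rw [e]; exact PySem.List.pyGetD_natCast ..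
    rw [g1, g2]
    by_cases h2 : A.getD i 0 < A.getD (i + 1) 0
    · rw [if_pos h2, if_pos (And.intro h1 h2), e]
    · rw [if_neg h2, if_neg (by tauto)]; norm_num
  · have hcond : ¬ ((i : Int) < (A.length : Int) ∧ (i : Int) + 1 < (A.length : Int)) := by
      intro ⟨_, hb⟩; omega
    rw [dif_neg hcond, if_neg (by tauto)]; norm_num

lemma pvRuns_drop (A : List Int) : ∀ d i, A.length - i = d →
    pvRuns (A.drop i) = (List.range' i d).map (pvRunLen A) := by
  intro d
  induction d with
  | zero =>
    intro i hi
    have : A.length ≤ i := by omega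
    simp [List.drop_eq_nil_of_le this, pvRuns]
  | succ d ih =>
    intro i hi
    have hlt : i < A.length := by omega
    rw [List.drop_eq_getElem_cons hlt]
    have htail : pvRuns (A.drop (i + 1)) = (List.range' (i + 1) d).map (pvRunLen A) :=
      ih (i + 1) (by omega)
    have hget : A[i] = A.getD i 0 := by rw [List.getD_eq_getElem]
    by_cases h1 : i + 1 < A.length
    · have hd1 : 0 < d := by omega
      obtain ⟨y, t, hyt⟩ : ∃ y t, A.drop (i + 1) = y :: t := by
        have : A.drop (i + 1) ≠ [] := by
          intro hnil
          have := List.drop_eq_nil_iff.mp hnil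
          omega
        exact List.exists_cons_of_ne_nil this
      have hy : y = A.getD (i + 1) 0 := by
        have h := List.drop_eq_getElem_cons h1 (l := A)
        rw [hyt] at h
        injection h with hy1 hy2
        rw [List.getD_eq_getElem]
        exact hy1
      have hhead : (pvRuns (A.drop (i + 1))).headD 0 = pvRunLen A (i + 1) := by
        rw [htail]
        cases hd : d with
        | zero => omega
        | succ d' => simp [List.range'_succ]
      have : pvRuns (A[i] :: A.drop (i + 1)) =
          (if A[i] < y then (pvRuns (A.drop (i + 1))).headD 0 + 1 else 1)
            :: pvRuns (A.drop (i + 1)) := by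
        rw [hyt]; rfl
      rw [this, hhead, hy, hget, htail]
      rw [List.range'_succ, List.map_cons, pvRunLen_rec A i hlt]
      simp [h1]
    · have hlen : A.length = i + 1 := by omega
      have hd0 : d = 0 := by omega
      have hnil : A.drop (i + 1) = [] := List.drop_eq_nil_of_le (by omega)
      have : pvRuns (A[i] :: A.drop (i + 1)) = [(1 : Int)] := by
        rw [hnil]; rfl
      rw [this]
      subst hd0
      simp [List.range'_succ, pvRunLen_rec A i hlt, h1]

lemma pvRuns_eq (A : List Int) : pvRuns A = (List.range A.length).map (pvRunLen A) := by
  have := pvRuns_drop A A.length 0 (by omega)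
  simpa [List.range_eq_range'] using this

-- the first loop's foldl builds (running max, mapped list)
lemma pvFoldBuild (g : Int → Int) : ∀ (l : List Int) (m : Int) (acc : List Int),
    l.foldl (fun (s : Int × List Int) i => (max s.1 (g i), s.2 ++ [g i])) (m, acc)
      = (l.foldl (fun m i => max m (g i)) m, acc ++ l.map g) := by
  intro l
  induction l with
  | nil => simp
  | cons x t ih => intro m acc; simp [List.foldl_cons, ih]

lemma pvFoldlMax (l : List Int) : ∀ a : Int, 0 ≤ a →
    l.foldl max a = max a (pvMax l) := by
  induction l with
  | nil => intro a ha; simp [pvMax]; omega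
  | cons x t ih =>
    intro a ha
    by_cases hx : 0 ≤ max a x
    · rw [List.foldl_cons, ih (max a x) hx, pvMax_cons]; omega
    · omega

lemma pvCountFold (M : Int) : ∀ (l : List Int) (c : Int),
    l.foldl (fun c x => if x = M then c + 1 else c) c = c + (l.count M : Int) := by
  intro l
  induction l with
  | nil => simp
  | cons x t ih =>
    intro c
    by_cases hx : x = M
    · simp [List.foldl_cons, hx, ih]; ring
    · simp [List.foldl_cons, hx, ih]

-- first-loop iterator: pyRange over indices, with g applied, rewritten to map over range
lemma pvRangeCast (n : Nat) (g : Int → Int) :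
    (PySem.List.pyRange 0 (n : Int) 1).map g = (List.range n).map (fun (k : Nat) => g (k : Int)) := by
  rw [PySem.List.pyRange_one]
  have h : ((n : Int) - 0).toNat = n := by omega
  rw [h, List.map_map]
  apply List.map_congr_left
  intro a _
  simp

lemma pvFoldlMaxCast (n : Nat) (g : Int → Int) (m : Int) :
    (PySem.List.pyRange 0 (n : Int) 1).foldl (fun m i => max m (g i)) m
      = (List.range n).foldl (fun (m : Int) (k : Nat) => max m (g (k : Int))) m := by
  rw [PySem.List.pyRange_one]
  have h : ((n : Int) - 0).toNat = n := by omega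
  rw [h, List.foldl_map]
  congr 1
  funext m' k
  simp

-- ===== VERDICT (by name: the statement is the Claim_ definition above) =====
theorem count_long_subarray_spec : Claim_equal_count_long_subarray := by
  intro A _
  unfold Spec_count_long_subarray count_long_subarray count_long_subarray_alt
  rw [pvAltGo_spec]
  simp only []
  rw [pvFoldBuild (fun i => pvWhileA A i (i + 1) + 1)]
  -- identify arr with pvRuns A
  have harr : (PySem.List.pyRange 0 (A.length : Int) 1).map (fun i => pvWhileA A i (i + 1) + 1)
      = pvRuns A := by
    rw [pvRangeCast A.length (fun i => pvWhileA A i (i + 1) + 1), pvRuns_eq]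
    apply List.map_congr_left
    intro k _
    simp [pvRunLen]
  -- identify max_len with pvMax (pvRuns A)
  have hmax : (PySem.List.pyRange 0 (A.length : Int) 1).foldl
        (fun m i => max m (pvWhileA A i (i + 1) + 1)) 0 = pvMax (pvRuns A) := by
    rw [pvFoldlMaxCast A.length (fun i => pvWhileA A i (i + 1) + 1) 0]
    have : (List.range A.length).foldl (fun (m : Int) (k : Nat) => max m (pvWhileA A (k : Int) ((k : Int) + 1) + 1)) 0
        = (pvRuns A).foldl max 0 := by
      rw [pvRuns_eq, List.foldl_map]
      congr 1
    rw [this, pvFoldlMax (pvRuns A) 0 (by omega)]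
    have := pvMax_nonneg (pvRuns A)
    omega
  simp only [List.nil_append] at *
  rw [harr, hmax]
  have hcount := PySem.List.foldl_pyRange_zero_pyGetD' (pvRuns A) 0
        (fun (c : Int) x => if x = pvMax (pvRuns A) then c + 1 else c) (0 : Int)
  exact hcount.trans ((pvCountFold (pvMax (pvRuns A)) (pvRuns A) 0).trans (zero_add _))
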